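-- pv_equiv track=rewrite | github.com/jonisrael/Tetris_Rush_v1.0 | tetris_rush_v1.0.py | game_over_grid
-- ===== SOURCE A (Python) =====
-- black = (0,0,0); grey = (128,128,128); white = (255,255,255)
--
-- def game_over_grid(locked_positions={}):
--     grid = [[white for x in range(10)] for x in range(20)]
--
--     for i in range(len(grid)):
--         for j in range(len(grid[i])):
--             if (j,i) in locked_positions:
--                 c = locked_positions[(j,i)]
--                 grid[i][j] = c
--     return grid
-- ===== SOURCE B (Python) =====
-- black = (0,0,0); grey = (128,128,128); white = (255,255,255)
--
-- def game_over_grid(locked_positions={}):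
--     grid = [[white] * 10 for _ in range(20)]
--     for (x, y), c in locked_positions.items():
--         if 0 <= y < 20 and 0 <= x < 10:
--             grid[y][x] = c
--     return grid
-- ===== Notes on version B (the rewrite author's own statement) =====
-- stated objective: simpler
-- what changed: B builds the white 20x10 grid once and iterates only over the sparse locked cells, assigning grid[y][x] under a bounds guard, instead of scanning all 200 grid cells with a membership test per cell.
import Mathlib
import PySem

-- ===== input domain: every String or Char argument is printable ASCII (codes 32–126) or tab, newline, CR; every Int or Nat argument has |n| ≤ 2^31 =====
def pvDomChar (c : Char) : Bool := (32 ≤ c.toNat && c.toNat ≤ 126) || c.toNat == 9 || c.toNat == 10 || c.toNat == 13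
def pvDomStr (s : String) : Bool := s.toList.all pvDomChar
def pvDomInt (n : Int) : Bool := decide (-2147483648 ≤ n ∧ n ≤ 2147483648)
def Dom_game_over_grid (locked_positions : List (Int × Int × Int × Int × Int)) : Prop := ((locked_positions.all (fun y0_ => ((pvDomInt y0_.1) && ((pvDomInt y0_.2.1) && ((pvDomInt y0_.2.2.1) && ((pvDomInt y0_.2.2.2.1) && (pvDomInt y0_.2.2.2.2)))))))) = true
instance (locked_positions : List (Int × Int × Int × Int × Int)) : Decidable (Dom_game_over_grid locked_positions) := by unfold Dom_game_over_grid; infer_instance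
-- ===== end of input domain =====

-- B builds the white 20x10 grid once and writes only the sparse locked cells (with a bounds
-- guard, since out-of-range keys are silently ignored by A's dense scan), instead of testing
-- membership at each of the 200 grid cells.  Objective: simpler.

-- ===== PORT A =====
def pvWhite : Int × Int × Int := (255, 255, 255)

-- first-match association lookup = Python's `(j,i) in locked_positions` + `locked_positions[(j,i)]`
def pvDget (lp : List (Int × Int × Int × Int × Int)) (k : Int × Int) : Option (Int × Int × Int) :=
  match lp with
  | [] => none
  | (x, y, r, g, b) :: t => if (x, y) = k then some (r, g, b) else pvDget t k

-- inner loop: `for j in range(len(grid[i])): if (j,i) in lp: grid[i][j] = lp[(j,i)]`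
def pvAInner (lp : List (Int × Int × Int × Int × Int)) (i : Nat)
    (g : List (List (Int × Int × Int))) : List (List (Int × Int × Int)) :=
  (List.range (g.getD i []).length).foldl (fun g2 (j : Nat) =>
    match pvDget lp ((j : Int), (i : Int)) with
    | some c => g2.set i ((g2.getD i []).set j c)
    | none => g2) g

def game_over_grid (locked_positions : List (Int × Int × Int × Int × Int)) : List (List (Int × Int × Int)) :=
  let grid : List (List (Int × Int × Int)) :=
    (List.range 20).map (fun _ => (List.range 10).map (fun _ => pvWhite))
  (List.range grid.length).foldl (fun g i => pvAInner locked_positions i g) grid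

-- ===== PORT B =====
-- one item: `if 0 <= y < 20 and 0 <= x < 10: grid[y][x] = c`
def pvBStep (g : List (List (Int × Int × Int))) (e : Int × Int × Int × Int × Int) :
    List (List (Int × Int × Int)) :=
  if 0 ≤ e.2.1 ∧ e.2.1 < 20 ∧ 0 ≤ e.1 ∧ e.1 < 10 then
    g.set e.2.1.toNat ((g.getD e.2.1.toNat []).set e.1.toNat (e.2.2.1, e.2.2.2.1, e.2.2.2.2))
  else g

def game_over_grid_alt (locked_positions : List (Int × Int × Int × Int × Int)) : List (List (Int × Int × Int)) :=
  let grid : List (List (Int × Int × Int)) :=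
    (List.range 20).map (fun _ => List.replicate 10 pvWhite)
  locked_positions.foldl pvBStep grid

-- ===== PRECONDITION & SPEC =====
-- Pre_ requires the (x,y) keys to be pairwise distinct: the argument models a Python dict, whose
-- keys are always distinct; on duplicate keys the association list has no dict counterpart
-- (first-match lookup vs. overwrite-on-insert would disagree).
def Pre_game_over_grid (locked_positions : List (Int × Int × Int × Int × Int)) : Prop :=
  (locked_positions.map (fun e => (e.1, e.2.1))).Nodup
instance (locked_positions : List (Int × Int × Int × Int × Int)) : Decidable (Pre_game_over_grid locked_positions) := by unfold Pre_game_over_grid; infer_instance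

def pvWitness_game_over_grid : (List (Int × Int × Int × Int × Int)) :=
  [(0, 0, 1, 2, 3), (5, 19, 7, 8, 9), (-2, 30, 4, 4, 4)]

def Spec_game_over_grid (locked_positions : List (Int × Int × Int × Int × Int)) (out : List (List (Int × Int × Int))) : Prop := out = game_over_grid_alt locked_positions
instance (locked_positions : List (Int × Int × Int × Int × Int)) (out : List (List (Int × Int × Int))) : Decidable (Spec_game_over_grid locked_positions out) := by unfold Spec_game_over_grid; infer_instance

-- ===== CLAIM (what is proved, stated in full; the proofs are below) =====
def Claim_equal_game_over_grid : Prop := ∀ (locked_positions : List (Int × Int × Int × Int × Int)), Dom_game_over_grid locked_positions → Pre_game_over_grid locked_positions → Spec_game_over_grid locked_positions (game_over_grid locked_positions)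

-- ===== LEMMAS AND PROOFS =====

-- the common target: cell (i,j) holds the looked-up colour, white otherwise
def pvSpecGrid (lp : List (Int × Int × Int × Int × Int)) : List (List (Int × Int × Int)) :=
  (List.range 20).map (fun (i : Nat) => (List.range 10).map (fun (j : Nat) =>
    (pvDget lp ((j : Int), (i : Int))).getD pvWhite))

def pvRowFold (lp : List (Int × Int × Int × Int × Int)) (i : Nat) (n : Nat)
    (row : List (Int × Int × Int)) : List (Int × Int × Int) :=
  (List.range n).foldl (fun row (j : Nat) =>
    match pvDget lp ((j : Int), (i : Int)) with
    | some c => row.set j c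
    | none => row) row

theorem pvRowFold_succ (lp : List (Int × Int × Int × Int × Int)) (i m : Nat)
    (row : List (Int × Int × Int)) :
    pvRowFold lp i (m + 1) row =
      match pvDget lp ((m : Int), (i : Int)) with
      | some c => (pvRowFold lp i m row).set m c
      | none => pvRowFold lp i m row := by
  unfold pvRowFold
  rw [List.range_succ, List.foldl_append]
  simp

theorem pvRowFold_length (lp : List (Int × Int × Int × Int × Int)) (i n : Nat)
    (row : List (Int × Int × Int)) : (pvRowFold lp i n row).length = row.length := by
  induction n with
  | zero => simp [pvRowFold]
  | succ m ih =>
    rw [pvRowFold_succ]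
    cases h : pvDget lp ((m : Int), (i : Int)) <;> simp [ih]

theorem pvRowFold_getD (lp : List (Int × Int × Int × Int × Int)) (i n : Nat)
    (row : List (Int × Int × Int)) (j : Nat) (hj : j < row.length) :
    (pvRowFold lp i n row).getD j pvWhite =
      if j < n then (pvDget lp ((j : Int), (i : Int))).getD (row.getD j pvWhite)
      else row.getD j pvWhite := by
  induction n with
  | zero => simp [pvRowFold]
  | succ m ih =>
    rw [pvRowFold_succ]
    cases h : pvDget lp ((m : Int), (i : Int)) with
    | none =>
      rw [ih]
      by_cases hjm : j = m
      · subst hjm; simp [h]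
      · split_ifs <;> first | rfl | omega
    | some c =>
      by_cases hjm : j = m
      · subst hjm
        have hlen : j < (pvRowFold lp i j row).length := by rw [pvRowFold_length]; exact hj
        simp [List.getD_eq_getElem?_getD, List.getElem?_set_self hlen, h]
      · have hne : (pvRowFold lp i m row |>.set m c).getD j pvWhite
            = (pvRowFold lp i m row).getD j pvWhite := by
          simp [List.getD_eq_getElem?_getD, List.getElem?_set_ne (by omega : m ≠ j)]
        rw [hne, ih]
        split_ifs <;> first | rfl | omega

theorem pvAInnerFold_eq (lp : List (Int × Int × Int × Int × Int)) (i n : Nat)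
    (g : List (List (Int × Int × Int))) (hi : i < g.length) :
    (List.range n).foldl (fun g2 (j : Nat) =>
      match pvDget lp ((j : Int), (i : Int)) with
      | some c => g2.set i ((g2.getD i []).set j c)
      | none => g2) g = g.set i (pvRowFold lp i n (g.getD i [])) := by
  induction n with
  | zero =>
    simp only [List.range_zero, List.foldl_nil, pvRowFold]
    rw [List.getD_eq_getElem _ _ hi, List.set_getElem_self]
  | succ m ih =>
    rw [List.range_succ, List.foldl_append, ih]
    simp only [List.foldl_cons, List.foldl_nil]
    rw [pvRowFold_succ]
    cases h : pvDget lp ((m : Int), (i : Int)) with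
    | none => rfl
    | some c =>
      have hlen : i < (g.set i (pvRowFold lp i m (g.getD i []))).length := by
        simp [hi]
      rw [List.getD_eq_getElem _ _ hlen]
      simp [List.set_set]

theorem pvAInner_eq_set (lp : List (Int × Int × Int × Int × Int)) (i : Nat)
    (g : List (List (Int × Int × Int))) (hi : i < g.length) :
    pvAInner lp i g = g.set i (pvRowFold lp i (g.getD i []).length (g.getD i [])) :=
  pvAInnerFold_eq lp i _ g hi

theorem pvAInnerFold_length (lp : List (Int × Int × Int × Int × Int)) (i n : Nat)
    (g : List (List (Int × Int × Int))) :
    ((List.range n).foldl (fun g2 (j : Nat) =>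
      match pvDget lp ((j : Int), (i : Int)) with
      | some c => g2.set i ((g2.getD i []).set j c)
      | none => g2) g).length = g.length := by
  induction n with
  | zero => simp
  | succ m ih =>
    rw [List.range_succ, List.foldl_append]
    simp only [List.foldl_cons, List.foldl_nil]
    cases h : pvDget lp ((m : Int), (i : Int)) <;>
      first
        | exact ih
        | (rw [List.length_set]; exact ih)

theorem pvAInner_length (lp : List (Int × Int × Int × Int × Int)) (i : Nat)
    (g : List (List (Int × Int × Int))) : (pvAInner lp i g).length = g.length :=
  pvAInnerFold_length lp i _ g

theorem pvAOuter_length (lp : List (Int × Int × Int × Int × Int)) (n : Nat)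
    (g : List (List (Int × Int × Int))) :
    ((List.range n).foldl (fun g i => pvAInner lp i g) g).length = g.length := by
  induction n with
  | zero => simp
  | succ m ih =>
    rw [List.range_succ, List.foldl_append]
    simp only [List.foldl_cons, List.foldl_nil]
    rw [pvAInner_length, ih]

theorem pvAOuter_getElem? (lp : List (Int × Int × Int × Int × Int))
    (n : Nat) (g : List (List (Int × Int × Int))) (hn : n ≤ g.length) (k : Nat) :
    ((List.range n).foldl (fun g i => pvAInner lp i g) g)[k]? =
      if k < n then some (pvRowFold lp k (g.getD k []).length (g.getD k [])) else g[k]? := by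
  induction n generalizing k with
  | zero => simp
  | succ m ih =>
    have hm : m ≤ g.length := by omega
    rw [List.range_succ, List.foldl_append]
    simp only [List.foldl_cons, List.foldl_nil]
    have hlen : ((List.range m).foldl (fun g i => pvAInner lp i g) g).length = g.length :=
      pvAOuter_length lp m g
    have hmlt : m < ((List.range m).foldl (fun g i => pvAInner lp i g) g).length := by omega
    rw [pvAInner_eq_set lp m _ hmlt]
    have hgd : ((List.range m).foldl (fun g i => pvAInner lp i g) g).getD m [] = g.getD m [] := by
      rw [List.getD_eq_getElem?_getD, ih hm m]
      simp [List.getD_eq_getElem?_getD]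
    rw [hgd]
    by_cases hk : k = m
    · subst hk
      rw [List.getElem?_set_self hmlt]
      simp
    · rw [List.getElem?_set_ne (by omega : m ≠ k), ih hm k]
      split_ifs <;> first | rfl | omega

theorem pvGetD_set_self {α : Type} (l : List α) (m : Nat) (a d : α) (h : m < l.length) :
    (l.set m a).getD m d = a := by
  rw [List.getD_eq_getElem?_getD, List.getElem?_set_self h]; rfl

theorem pvGetD_set_ne {α : Type} (l : List α) (m k : Nat) (a d : α) (h : m ≠ k) :
    (l.set m a).getD k d = l.getD k d := by
  rw [List.getD_eq_getElem?_getD, List.getElem?_set_ne h, ← List.getD_eq_getElem?_getD]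

theorem pvBStep_length (g : List (List (Int × Int × Int))) (e : Int × Int × Int × Int × Int) :
    (pvBStep g e).length = g.length := by
  unfold pvBStep; split_ifs <;> simp

theorem pvBStep_row_length (g : List (List (Int × Int × Int))) (e : Int × Int × Int × Int × Int)
    (k : Nat) : ((pvBStep g e).getD k []).length = (g.getD k []).length := by
  unfold pvBStep
  split_ifs with hc
  · by_cases hk1 : e.2.1.toNat = k
    · subst hk1
      by_cases hk2 : e.2.1.toNat < g.length
      · rw [pvGetD_set_self _ _ _ _ hk2, List.length_set]
      · rw [List.set_eq_of_length_le (by omega)]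
    · rw [pvGetD_set_ne _ _ _ _ _ hk1]
  · rfl

theorem pvBFold_length (lp : List (Int × Int × Int × Int × Int))
    (g : List (List (Int × Int × Int))) : (lp.foldl pvBStep g).length = g.length := by
  induction lp generalizing g with
  | nil => rfl
  | cons e t ih => rw [List.foldl_cons, ih, pvBStep_length]

theorem pvBFold_row_length (lp : List (Int × Int × Int × Int × Int))
    (g : List (List (Int × Int × Int))) (k : Nat) :
    ((lp.foldl pvBStep g).getD k []).length = (g.getD k []).length := by
  induction lp generalizing g with
  | nil => rfl
  | cons e t ih => rw [List.foldl_cons, ih, pvBStep_row_length]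

theorem pvDget_eq_none (lp : List (Int × Int × Int × Int × Int)) (k : Int × Int)
    (h : k ∉ lp.map (fun e => (e.1, e.2.1))) : pvDget lp k = none := by
  induction lp with
  | nil => rfl
  | cons e t ih =>
    obtain ⟨x, y, r, gr, b⟩ := e
    simp only [List.map_cons, List.mem_cons, not_or] at h
    unfold pvDget
    rw [if_neg (by intro hh; exact h.1 hh.symm)]
    exact ih h.2

theorem pvBFold_getD (lp : List (Int × Int × Int × Int × Int))
    (g : List (List (Int × Int × Int))) (i j : Nat)
    (hi : i < 20) (hj : j < 10)
    (hg : g.length = 20) (hrow : ∀ k, k < 20 → ((g.getD k []).length = 10))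
    (hnd : (lp.map (fun e => (e.1, e.2.1))).Nodup) :
    ((lp.foldl pvBStep g).getD i []).getD j pvWhite =
      (pvDget lp ((j : Int), (i : Int))).getD ((g.getD i []).getD j pvWhite) := by
  induction lp generalizing g with
  | nil => rfl
  | cons e t ih =>
    obtain ⟨x, y, r, gr, b⟩ := e
    rw [List.foldl_cons]
    simp only [List.map_cons, List.nodup_cons] at hnd
    have hg' : (pvBStep g (x, y, r, gr, b)).length = 20 := by rw [pvBStep_length]; exact hg
    have hrow' : ∀ k, k < 20 → (((pvBStep g (x, y, r, gr, b)).getD k []).length = 10) := by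
      intro k hk; rw [pvBStep_row_length]; exact hrow k hk
    rw [ih _ hg' hrow' hnd.2]
    by_cases hk : ((x : Int), (y : Int)) = (((j : Nat) : Int), ((i : Nat) : Int))
    · -- matching key: this step writes cell (i,j); the tail never touches it again
      have hx : x = (j : Int) := by injection hk
      have hy : y = (i : Int) := by injection hk with _ h2
      have hdt : pvDget t ((j : Int), (i : Int)) = none := by
        apply pvDget_eq_none; rw [← hk]; exact hnd.1
      have hcond : 0 ≤ y ∧ y < 20 ∧ 0 ≤ x ∧ x < 10 := by
        subst hx hy
        exact ⟨Int.natCast_nonneg i, by exact_mod_cast hi, Int.natCast_nonneg j,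
          by exact_mod_cast hj⟩
      have hyt : y.toNat = i := by rw [hy]; exact Int.toNat_natCast i
      have hxt : x.toNat = j := by rw [hx]; exact Int.toNat_natCast j
      have hstep : pvBStep g (x, y, r, gr, b)
          = g.set i ((g.getD i []).set j (r, gr, b)) := by
        unfold pvBStep; dsimp only; rw [if_pos hcond, hyt, hxt]
      have h1 : (g.set i ((g.getD i []).set j (r, gr, b))).getD i []
          = (g.getD i []).set j (r, gr, b) :=
        pvGetD_set_self _ _ _ _ (by omega)
      have h2 : ((g.getD i []).set j (r, gr, b)).getD j pvWhite = (r, gr, b) :=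
        pvGetD_set_self _ _ _ _ (by rw [hrow i hi]; exact hj)
      have h3 : pvDget ((x, y, r, gr, b) :: t) ((j : Int), (i : Int)) = some (r, gr, b) := by
        simp only [pvDget, if_pos hk]
      rw [hstep, h1, h2, hdt, h3]
      rfl
    · -- non-matching key: cell (i,j) is unchanged by this step
      have hstep : ((pvBStep g (x, y, r, gr, b)).getD i []).getD j pvWhite
          = (g.getD i []).getD j pvWhite := by
        unfold pvBStep
        split_ifs with hc
        · dsimp only at hc ⊢
          obtain ⟨hc1, hc2, hc3, hc4⟩ := hc
          by_cases hyi : y.toNat = i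
          · have hy : y = (i : Int) := by omega
            have hxt : x.toNat ≠ j := by
              intro hxe
              exact hk (by rw [hy, show x = (j : Int) by omega])
            rw [hyi, pvGetD_set_self _ _ _ _ (by omega), pvGetD_set_ne _ _ _ _ _ hxt]
          · rw [pvGetD_set_ne _ _ _ _ _ hyi]
        · rfl
      rw [hstep]
      have hdg : pvDget ((x, y, r, gr, b) :: t) ((j : Int), (i : Int))
          = pvDget t ((j : Int), (i : Int)) := by
        simp only [pvDget, if_neg hk]
      rw [hdg]


theorem pvA_eq_spec (lp : List (Int × Int × Int × Int × Int)) :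
    game_over_grid lp = pvSpecGrid lp := by
  have hdef : game_over_grid lp = (List.range 20).foldl (fun g i => pvAInner lp i g)
      ((List.range 20).map (fun _ : Nat => (List.range 10).map (fun _ : Nat => pvWhite))) := rfl
  rw [hdef]
  apply List.ext_getElem?
  intro k
  rw [pvAOuter_getElem? lp 20 _ (by simp) k]
  by_cases hk : k < 20
  · rw [if_pos hk]
    have hrow0 : ((List.range 20).map
          (fun _ : Nat => (List.range 10).map (fun _ : Nat => pvWhite))).getD k []
        = (List.range 10).map (fun _ : Nat => pvWhite) := by
      rw [List.getD_eq_getElem?_getD, List.getElem?_map, List.getElem?_range hk]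
      rfl
    rw [hrow0]
    have hspec : (pvSpecGrid lp)[k]? = some ((List.range 10).map (fun j : Nat =>
        (pvDget lp ((j : Int), (k : Int))).getD pvWhite)) := by
      unfold pvSpecGrid
      rw [List.getElem?_map, List.getElem?_range hk]
      rfl
    rw [hspec]
    refine congrArg some ?_
    apply List.ext_getElem (by rw [pvRowFold_length]; simp)
    intro j hj1 hj2
    have hj : j < 10 := by simpa using hj2
    rw [← List.getD_eq_getElem _ pvWhite hj1,
      pvRowFold_getD lp k _ _ j (by rw [List.length_map, List.length_range]; exact hj)]
    rw [if_pos (show j < ((List.range 10).map (fun _ : Nat => pvWhite)).length by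
      rw [List.length_map, List.length_range]; exact hj)]
    have hw : ((List.range 10).map (fun _ : Nat => pvWhite)).getD j pvWhite = pvWhite := by
      rw [List.getD_eq_getElem?_getD, List.getElem?_map, List.getElem?_range hj]
      rfl
    rw [hw, List.getElem_map, List.getElem_range]
  · rw [if_neg hk]
    have h1 : (((List.range 20).map
        (fun _ : Nat => (List.range 10).map (fun _ : Nat => pvWhite))))[k]? = none := by
      rw [List.getElem?_eq_none_iff, List.length_map, List.length_range]; omega
    have h2 : (pvSpecGrid lp)[k]? = none := by
      rw [List.getElem?_eq_none_iff]
      unfold pvSpecGrid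
      rw [List.length_map, List.length_range]; omega
    rw [h1, h2]

theorem pvB_eq_spec (lp : List (Int × Int × Int × Int × Int))
    (hnd : (lp.map (fun e => (e.1, e.2.1))).Nodup) :
    game_over_grid_alt lp = pvSpecGrid lp := by
  have hdef : game_over_grid_alt lp = lp.foldl pvBStep
      ((List.range 20).map (fun _ : Nat => List.replicate 10 pvWhite)) := rfl
  rw [hdef]
  have hg : ((List.range 20).map (fun _ : Nat => List.replicate 10 pvWhite)).length = 20 := by
    simp
  have hrow : ∀ k, k < 20 →
      ((((List.range 20).map (fun _ : Nat => List.replicate 10 pvWhite)).getD k []).length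
        = 10) := by
    intro k hk
    rw [List.getD_eq_getElem?_getD, List.getElem?_map, List.getElem?_range hk]
    rfl
  apply List.ext_getElem?
  intro k
  by_cases hk : k < 20
  · have hklen : k < (lp.foldl pvBStep
        ((List.range 20).map (fun _ : Nat => List.replicate 10 pvWhite))).length := by
      rw [pvBFold_length, hg]; exact hk
    rw [List.getElem?_eq_getElem hklen, ← List.getD_eq_getElem _ [] hklen]
    have hspec : (pvSpecGrid lp)[k]? = some ((List.range 10).map (fun j : Nat =>
        (pvDget lp ((j : Int), (k : Int))).getD pvWhite)) := by
      unfold pvSpecGrid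
      rw [List.getElem?_map, List.getElem?_range hk]
      rfl
    rw [hspec]
    refine congrArg some ?_
    apply List.ext_getElem (by rw [pvBFold_row_length, hrow k hk]; simp)
    intro j hj1 hj2
    have hj : j < 10 := by simpa using hj2
    rw [← List.getD_eq_getElem _ pvWhite hj1,
      pvBFold_getD lp _ k j hk hj hg hrow hnd]
    have hw : (((List.range 20).map
        (fun _ : Nat => List.replicate 10 pvWhite)).getD k []).getD j pvWhite = pvWhite := by
      have : ((List.range 20).map (fun _ : Nat => List.replicate 10 pvWhite)).getD k []
          = List.replicate 10 pvWhite := by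
        rw [List.getD_eq_getElem?_getD, List.getElem?_map, List.getElem?_range hk]
        rfl
      rw [this, List.getD_eq_getElem?_getD, List.getElem?_replicate_of_lt hj]
      rfl
    rw [hw, List.getElem_map, List.getElem_range]
  · have h1 : (lp.foldl pvBStep
        ((List.range 20).map (fun _ : Nat => List.replicate 10 pvWhite)))[k]? = none := by
      rw [List.getElem?_eq_none_iff, pvBFold_length, hg]; omega
    have h2 : (pvSpecGrid lp)[k]? = none := by
      rw [List.getElem?_eq_none_iff]
      unfold pvSpecGrid
      rw [List.length_map, List.length_range]; omega
    rw [h1, h2]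

-- ===== VERDICT (by name: the statement is the Claim_ definition above) =====
theorem game_over_grid_spec : Claim_equal_game_over_grid := by
  intro lp _ hpre
  unfold Spec_game_over_grid
  rw [pvA_eq_spec, pvB_eq_spec lp hpre]
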